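-- pv_equiv track=rewrite | github.com/tylerbcrawford/llimage | llimage/output/json.py | _infer_chart_type
-- ===== SOURCE A (Python) =====
-- from typing import Any, Dict, List, Optional, Union
--
-- def _infer_chart_type(shape_types: List[str]) -> Optional[str]:
--     """Infer the overall chart type based on detected shapes.
--
--     Args:
--         shape_types: List of detected shape types
--
--     Returns:
--         Inferred chart type or None if undetermined
--     """
--     # Count shape types
--     type_counts = {}
--     for shape_type in shape_types:
--         type_counts[shape_type] = type_counts.get(shape_type, 0) + 1
--
--     # Inference rules
--     if "segment" in type_counts:
--         return "pie_chart"
--     elif "rectangle" in type_counts and type_counts["rectangle"] > 1: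
--         return "bar_chart"
--     elif "point" in type_counts and type_counts["point"] > 2:
--         return "line_chart"
--     elif "circle" in type_counts and type_counts["circle"] == 1:
--         return "pie_chart"  # Empty or unprocessed pie chart
--
--     return None
-- ===== SOURCE B (Python) =====
-- from typing import List, Optional
--
-- def _infer_chart_type(shape_types: List[str]) -> Optional[str]:
--     """Sort-and-group strategy: sort the shapes, walk the runs of equal
--     elements once, and keep the best (lowest) matching rule rank; finally
--     map the rank to the chart type."""
--     xs = sorted(shape_types)
--     rank = 5
--     i, n = 0, len(xs)
--     while i < n:
--         j = i
--         while j < n and xs[j] == xs[i]: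
--             j += 1
--         t, c = xs[i], j - i
--         if t == "segment":
--             rank = min(rank, 1)
--         elif t == "rectangle" and c > 1:
--             rank = min(rank, 2)
--         elif t == "point" and c > 2:
--             rank = min(rank, 3)
--         elif t == "circle" and c == 1:
--             rank = min(rank, 4)
--         i = j
--     if rank == 1 or rank == 4:
--         return "pie_chart"
--     if rank == 2:
--         return "bar_chart"
--     if rank == 3:
--         return "line_chart"
--     return None
-- ===== Notes on version B (the rewrite author's own statement) =====
-- stated objective: alternative
-- what changed: Replaces the hash-count table plus ordered elif chain with a sort-then-scan algorithm: the list is sorted, runs of equal shapes are walked once while a minimum rule-rank accumulator records the best matching rule, and the final rank is mapped to the chart type.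
import Mathlib
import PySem

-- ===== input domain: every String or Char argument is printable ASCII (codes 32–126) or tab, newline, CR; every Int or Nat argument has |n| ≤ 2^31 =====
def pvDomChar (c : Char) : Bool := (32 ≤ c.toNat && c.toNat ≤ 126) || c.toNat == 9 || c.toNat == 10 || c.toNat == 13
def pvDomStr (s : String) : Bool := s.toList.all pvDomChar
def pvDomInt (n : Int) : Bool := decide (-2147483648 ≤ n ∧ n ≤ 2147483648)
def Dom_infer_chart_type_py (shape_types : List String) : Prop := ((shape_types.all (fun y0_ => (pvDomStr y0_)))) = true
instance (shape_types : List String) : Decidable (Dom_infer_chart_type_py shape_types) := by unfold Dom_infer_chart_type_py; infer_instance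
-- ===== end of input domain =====

-- B replaces A's hash-count table + elif chain by a sort-then-scan algorithm:
-- sort the shapes, walk the runs of equal elements keeping the minimum rule rank,
-- then map that rank to the chart type (alternative structure, same results).

-- ===== PORT A =====
-- Literal port of A: build the count dict, then read the rules off the dict.
def infer_chart_type_py (shape_types : List String) : Option String :=
  let type_counts : PySem.Dict String Int :=
    shape_types.foldl (fun d shape_type => d.insert shape_type (d.getD shape_type 0 + 1)) PySem.Dict.empty
  if type_counts.contains "segment" then some "pie_chart"
  else if type_counts.contains "rectangle" && decide (type_counts.getD "rectangle" 0 > 1) then some "bar_chart"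
  else if type_counts.contains "point" && decide (type_counts.getD "point" 0 > 2) then some "line_chart"
  else if type_counts.contains "circle" && decide (type_counts.getD "circle" 0 == 1) then some "pie_chart"
  else none

-- ===== PORT B =====
-- B's rule update for one run (t, c) against the current best rank.
def pvRuleRank (t : String) (c : Int) (rank : Int) : Int :=
  if t == "segment" then min rank 1
  else if t == "rectangle" && decide (c > 1) then min rank 2
  else if t == "point" && decide (c > 2) then min rank 3
  else if t == "circle" && decide (c == 1) then min rank 4
  else rank

-- B's outer while loop over the sorted list: the inner while advancing j over
-- equal elements is the takeWhile/dropWhile split of the run at the head.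
def pvScanRuns : List String → Int → Int
  | [], rank => rank
  | h :: tl, rank =>
      pvScanRuns (tl.dropWhile (fun x => x == h))
        (pvRuleRank h (1 + (tl.takeWhile (fun x => x == h)).length) rank)
  termination_by s _ => s.length
  decreasing_by
    simp only [List.length_cons]
    exact Nat.lt_succ_of_le (tl.length_dropWhile_le _)

def infer_chart_type_py_alt (shape_types : List String) : Option String :=
  let xs := PySem.List.sorted shape_types (fun x => x) false
  let rank := pvScanRuns xs 5
  if rank = 1 ∨ rank = 4 then some "pie_chart"
  else if rank = 2 then some "bar_chart"
  else if rank = 3 then some "line_chart"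
  else none

-- ===== PRECONDITION & SPEC =====
def Spec_infer_chart_type_py (shape_types : List String) (out : Option String) : Prop := out = infer_chart_type_py_alt shape_types
instance (shape_types : List String) (out : Option String) : Decidable (Spec_infer_chart_type_py shape_types out) := by unfold Spec_infer_chart_type_py; infer_instance

-- ===== CLAIM (what is proved, stated in full; the proofs are below) =====
def Claim_equal_infer_chart_type_py : Prop := ∀ (shape_types : List String), Dom_infer_chart_type_py shape_types → Spec_infer_chart_type_py shape_types (infer_chart_type_py shape_types)

-- ===== LEMMAS AND PROOFS =====

-- the rank determined by the counts of a list (spec of B's scan)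
def pvFRank (s : List String) : Int :=
  min (if "segment" ∈ s then 1 else 5)
   (min (if s.count "rectangle" > 1 then 2 else 5)
    (min (if s.count "point" > 2 then 3 else 5)
         (if s.count "circle" = 1 then 4 else 5)))

-- the rank contributed by one full run (t, c)
def pvGRank (t : String) (c : Int) : Int :=
  if t = "segment" then 1
  else if t = "rectangle" ∧ c > 1 then 2
  else if t = "point" ∧ c > 2 then 3
  else if t = "circle" ∧ c = 1 then 4
  else 5

theorem pvFRank_le_five (s : List String) : pvFRank s ≤ 5 := by
  unfold pvFRank; split_ifs <;> omega

theorem pvRuleRank_eq (t : String) (c r : Int) (hr : r ≤ 5) :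
    pvRuleRank t c r = min r (pvGRank t c) := by
  unfold pvRuleRank pvGRank
  split_ifs <;> simp_all <;> omega

theorem pvFRank_cons (h : String) (tl : List String)
    (hs : (h :: tl).Pairwise (· ≤ ·)) :
    pvFRank (h :: tl)
      = min (pvGRank h (1 + ((tl.takeWhile (fun x => x == h)).length : Int)))
            (pvFRank (tl.dropWhile (fun x => x == h))) := by
  obtain ⟨hall, htl⟩ := List.pairwise_cons.mp hs
  set tk := tl.takeWhile (fun x => x == h) with htk
  set dp := tl.dropWhile (fun x => x == h) with hdp
  have hsplit : tl = tk ++ dp := (List.takeWhile_append_dropWhile).symm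
  have htke : ∀ x ∈ tk, x = h := by
    intro x hx
    have := List.mem_takeWhile_imp (l := tl) (p := fun x => x == h) hx
    simpa using this
  have hdps : dp.Pairwise (· ≤ ·) :=
    List.Pairwise.sublist (List.dropWhile_sublist _) htl
  have hnd : h ∉ dp := by
    intro hmem
    cases hdd : dp with
    | nil => simp [hdd] at hmem
    | cons d rest =>
      have hdne : ¬ (d == h) = true := by
        have := List.head?_dropWhile_not (p := fun x => x == h) tl
        rw [← hdp, hdd] at this; simpa using this
      have hdneq : d ≠ h := by simpa using hdne
      have hdin : d ∈ tl := by rw [hsplit, hdd]; simp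
      have hhd : h ≤ d := hall d hdin
      rcases (by simpa [hdd] using hmem : h = d ∨ h ∈ rest) with heq | hrest
      · exact hdneq heq.symm
      · have hdle : d ≤ h := by
          rw [hdd] at hdps
          exact (List.pairwise_cons.mp hdps).1 h hrest
        exact hdneq (le_antisymm hdle hhd)
  have hck : (h :: tl).count h = 1 + tk.length := by
    have h1 : tk.count h = tk.length := by
      rw [List.count_eq_length]
      intro x hx; have := htke x hx; simp [this]
    have h2 : dp.count h = 0 := List.count_eq_zero.mpr hnd
    rw [List.count_cons_self, hsplit, List.count_append, h1, h2]; omega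
  have hzero : dp.count h = 0 := List.count_eq_zero.mpr hnd
  have hcu : ∀ u : String, u ≠ h → (h :: tl).count u = dp.count u := by
    intro u hu
    have h1 : tk.count u = 0 := by
      rw [List.count_eq_zero]; intro hx; exact hu (htke u hx)
    rw [hsplit]
    simp [List.count_cons, List.count_append, h1, Ne.symm hu]
  have hmu : ∀ u : String, u ≠ h → ((u ∈ (h :: tl)) ↔ u ∈ dp) := by
    intro u hu
    rw [← List.count_pos_iff, ← List.count_pos_iff, hcu u hu]
  by_cases h1 : h = "segment"
  · subst h1
    have hms : ("segment" : String) ∈ "segment" :: tl := List.mem_cons_self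
    have hg : pvGRank "segment" (1 + (tk.length : Int)) = 1 := by
      unfold pvGRank; simp
    rw [hg]
    unfold pvFRank
    rw [hcu "rectangle" (by decide), hcu "point" (by decide), hcu "circle" (by decide)]
    simp only [hms, hnd]
    split_ifs <;> first | contradiction | omega
  · by_cases h2 : h = "rectangle"
    · subst h2
      have hg : pvGRank "rectangle" (1 + (tk.length : Int))
          = if (1 : Int) + (tk.length : Int) > 1 then 2 else 5 := by
        unfold pvGRank; simp
      rw [hg]
      unfold pvFRank
      rw [hcu "point" (by decide), hcu "circle" (by decide), hck, hzero]
      simp only [hmu "segment" (by decide)]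
      split_ifs <;> first | contradiction | omega
    · by_cases h3 : h = "point"
      · subst h3
        have hg : pvGRank "point" (1 + (tk.length : Int))
            = if (1 : Int) + (tk.length : Int) > 2 then 3 else 5 := by
          unfold pvGRank; simp
        rw [hg]
        unfold pvFRank
        rw [hcu "rectangle" (by decide), hcu "circle" (by decide), hck, hzero]
        simp only [hmu "segment" (by decide)]
        split_ifs <;> first | contradiction | omega
      · by_cases h4 : h = "circle"
        · subst h4
          have hg : pvGRank "circle" (1 + (tk.length : Int))
              = if (1 : Int) + (tk.length : Int) = 1 then 4 else 5 := by
            unfold pvGRank; simp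
          rw [hg]
          unfold pvFRank
          rw [hcu "rectangle" (by decide), hcu "point" (by decide), hck, hzero]
          simp only [hmu "segment" (by decide)]
          split_ifs <;> first | contradiction | omega
        · have hg : pvGRank h (1 + (tk.length : Int)) = 5 := by
            unfold pvGRank; simp [h1, h2, h3, h4]
          rw [hg]
          unfold pvFRank
          rw [hcu "rectangle" (fun e => h2 e.symm), hcu "point" (fun e => h3 e.symm),
            hcu "circle" (fun e => h4 e.symm)]
          simp only [hmu "segment" (fun e => h1 e.symm)]
          split_ifs <;> first | contradiction | omega

theorem pvScanRuns_sorted (n : Nat) : ∀ (s : List String), s.length ≤ n →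
    ∀ r : Int, s.Pairwise (· ≤ ·) → r ≤ 5 →
    pvScanRuns s r = min r (pvFRank s) := by
  induction n with
  | zero =>
    intro s hlen r _ hr
    have : s = [] := List.length_eq_zero_iff.mp (Nat.le_zero.mp hlen)
    subst this
    simp [pvScanRuns, pvFRank]
    omega
  | succ m ih =>
    intro s hlen r hs hr
    cases s with
    | nil =>
      simp [pvScanRuns, pvFRank]
      omega
    | cons h tl =>
      rw [pvScanRuns]
      have hdlen : (tl.dropWhile (fun x => x == h)).length ≤ m := by
        have := tl.length_dropWhile_le (fun x => x == h)
        simp only [List.length_cons] at hlen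
        omega
      have hdps : (tl.dropWhile (fun x => x == h)).Pairwise (· ≤ ·) :=
        List.Pairwise.sublist (List.dropWhile_sublist _) (List.pairwise_cons.mp hs).2
      rw [pvRuleRank_eq _ _ _ hr]
      rw [ih _ hdlen _ hdps (by
        rcases min_le_right r (pvGRank h (1 + ((tl.takeWhile (fun x => x == h)).length : Int))) with h'
        have : pvGRank h (1 + ((tl.takeWhile (fun x => x == h)).length : Int)) ≤ 5 := by
          unfold pvGRank; split_ifs <;> omega
        omega)]
      rw [pvFRank_cons h tl hs]
      omega

-- characterisation of A by counts
theorem infer_chart_type_py_counts (shape_types : List String) :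
    infer_chart_type_py shape_types =
      (if "segment" ∈ shape_types then some "pie_chart"
       else if shape_types.count "rectangle" > 1 then some "bar_chart"
       else if shape_types.count "point" > 2 then some "line_chart"
       else if shape_types.count "circle" = 1 then some "pie_chart"
       else none) := by
  unfold infer_chart_type_py
  simp only [PySem.Dict.foldl_insert_getD_add_one_eq_counter, PySem.Dict.contains_counter,
    PySem.Dict.getD_counter]
  have hm : ∀ v : String, shape_types.contains v = decide (v ∈ shape_types) := by
    intro v; by_cases h : v ∈ shape_types <;> simp [h]
  simp only [hm]
  by_cases h1 : "segment" ∈ shape_types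
  · simp [h1]
  · by_cases h2 : shape_types.count "rectangle" > 1
    · have m2 : "rectangle" ∈ shape_types := List.count_pos_iff.mp (by omega)
      have h2' : ((shape_types.count "rectangle" : Int) > 1) := by omega
      simp [h1, h2, m2, h2']
    · have h2' : ¬ ((shape_types.count "rectangle" : Int) > 1) := by omega
      by_cases h3 : shape_types.count "point" > 2
      · have m3 : "point" ∈ shape_types := List.count_pos_iff.mp (by omega)
        have h3' : ((shape_types.count "point" : Int) > 2) := by omega
        simp [h1, h2, h2', h3, m3, h3']
      · have h3' : ¬ ((shape_types.count "point" : Int) > 2) := by omega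
        by_cases h4 : shape_types.count "circle" = 1
        · have m4 : "circle" ∈ shape_types := List.count_pos_iff.mp (by omega)
          simp [h1, h2, h2', h3, h3', h4, m4]
        · have h4' : ¬ ((shape_types.count "circle" : Int) = 1) := by omega
          simp [h1, h2, h2', h3, h3', h4, h4']

-- ===== VERDICT (by name: the statement is the Claim_ definition above) =====
theorem infer_chart_type_py_spec : Claim_equal_infer_chart_type_py := by
  intro xs _
  unfold Spec_infer_chart_type_py
  rw [infer_chart_type_py_counts]
  simp only [infer_chart_type_py_alt]
  have hperm : (PySem.List.sorted xs (fun x => x) false).Perm xs :=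
    PySem.List.sorted_perm xs (fun x => x) false
  have hsrt : (PySem.List.sorted xs (fun x => x) false).Pairwise (· ≤ ·) := by
    simpa using PySem.List.sorted_pairwise (xs := xs) (key := fun x => x)
  rw [pvScanRuns_sorted (PySem.List.sorted xs (fun x => x) false).length _ le_rfl _ hsrt (by omega)]
  have h5 : min (5 : Int) (pvFRank (PySem.List.sorted xs (fun x => x) false))
      = pvFRank (PySem.List.sorted xs (fun x => x) false) := by
    have := pvFRank_le_five (PySem.List.sorted xs (fun x => x) false)
    omega
  rw [h5]
  unfold pvFRank
  simp only [hperm.count_eq, hperm.mem_iff]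
  by_cases h1 : "segment" ∈ xs <;>
    by_cases h2 : xs.count "rectangle" > 1 <;>
      by_cases h3 : xs.count "point" > 2 <;>
        by_cases h4 : xs.count "circle" = 1 <;>
          simp [h1, h2, h3, h4, min_def]
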